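-- pv_equiv track=rewrite | github.com/navicor90/challenges | sort_logs.py | reorder_letter_logs
-- ===== SOURCE A (Python) =====
-- def minor_words_set(words1, words2):
--     if len(words1) == 0 or len(words2) == 0:
--         return 0
--     elif words1[0] < words2[0]:
--         return 1
--     elif words1[0] > words2[0]:
--         return 2
--     elif words1[0] == words2[0]:
--         return minor_words_set(words1[1:],words2[1:])
--
-- def reorder_letter_logs(ordered_letter_logs, log_words):
--     if(len(ordered_letter_logs) == 0):
--         return [log_words]
--
--     ordered_words = []
--     minor_param_words = minor_words_set(ordered_letter_logs[0], log_words)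
--
--     if minor_param_words == 1:
--         ordered_words.insert(0, ordered_letter_logs[0])
--         ordered_words = ordered_words + reorder_letter_logs(ordered_letter_logs[1:],log_words)
--     else:
--         ordered_words.insert(0, log_words)
--         ordered_words = ordered_words + ordered_letter_logs
--
--     return ordered_words
-- ===== SOURCE B (Python) =====
-- def _strictly_less(a, b):
--     for x, y in zip(a, b):
--         if x < y:
--             return True
--         if x > y:
--             return False
--     return False
--
-- def reorder_letter_logs(ordered_letter_logs, log_words):
--     result = []
--     inserted = False
--     for log in ordered_letter_logs:
--         if not inserted and not _strictly_less(log, log_words):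
--             result.append(log_words)
--             inserted = True
--         result.append(log)
--     if not inserted:
--         result.append(log_words)
--     return result
-- ===== Notes on version B (the rewrite author's own statement) =====
-- stated objective: simpler
-- what changed: Replaced the double recursion (recursive word-by-word comparator plus recursive list rebuild with list slicing and concatenation) by a single iterative pass with an inserted flag, and an iterative zip-scan comparator.
import Mathlib
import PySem

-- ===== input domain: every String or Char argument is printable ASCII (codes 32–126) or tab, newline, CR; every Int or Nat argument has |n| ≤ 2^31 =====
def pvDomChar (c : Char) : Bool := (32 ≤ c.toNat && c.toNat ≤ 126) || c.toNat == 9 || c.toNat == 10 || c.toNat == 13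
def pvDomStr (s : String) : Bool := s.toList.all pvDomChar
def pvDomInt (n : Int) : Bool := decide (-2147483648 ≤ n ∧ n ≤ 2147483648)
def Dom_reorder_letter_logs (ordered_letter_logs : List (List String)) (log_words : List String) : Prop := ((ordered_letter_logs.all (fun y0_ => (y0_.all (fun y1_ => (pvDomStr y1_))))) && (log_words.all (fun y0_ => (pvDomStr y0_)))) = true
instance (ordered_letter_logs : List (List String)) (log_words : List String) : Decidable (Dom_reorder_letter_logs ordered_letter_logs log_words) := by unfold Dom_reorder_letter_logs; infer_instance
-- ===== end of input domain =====

-- B replaces A's double recursion (recursive comparator + recursive rebuild via slices)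
-- by one iterative pass with an inserted flag and an iterative zip-scan comparator (simpler).

-- ===== PORT A =====
-- Python's minor_words_set: 0 if either list is empty, 1/2 at the first strictly
-- smaller/greater head, recurse on equal heads (strings are totally ordered, so the
-- final 'elif ==' branch is the only remaining case).
def minor_words_set (words1 words2 : List String) : Int :=
  match words1, words2 with
  | [], _ => 0
  | _, [] => 0
  | x :: xs, y :: ys =>
    if x < y then 1
    else if x > y then 2
    else minor_words_set xs ys

def reorder_letter_logs (ordered_letter_logs : List (List String)) (log_words : List String) : List (List String) :=
  match ordered_letter_logs with
  | [] => [log_words]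
  | h :: t =>
    if minor_words_set h log_words = 1 then
      h :: reorder_letter_logs t log_words
    else
      log_words :: (h :: t)

-- ===== PORT B =====
-- the for-loop of _strictly_less over zip(a, b)
def sl_go : List (String × String) → Bool
  | [] => false
  | (x, y) :: rest =>
    if x < y then true
    else if x > y then false
    else sl_go rest

def strictly_less (a b : List String) : Bool := sl_go (a.zip b)

def reorder_letter_logs_alt (ordered_letter_logs : List (List String)) (log_words : List String) : List (List String) :=
  let p := ordered_letter_logs.foldl
    (fun (acc : List (List String) × Bool) log =>
      if !acc.2 && !strictly_less log log_words then (acc.1 ++ [log_words, log], true)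
      else (acc.1 ++ [log], acc.2))
    ([], false)
  if !p.2 then p.1 ++ [log_words] else p.1

-- ===== PRECONDITION & SPEC =====
def Spec_reorder_letter_logs (ordered_letter_logs : List (List String)) (log_words : List String) (out : List (List String)) : Prop := out = reorder_letter_logs_alt ordered_letter_logs log_words
instance (ordered_letter_logs : List (List String)) (log_words : List String) (out : List (List String)) : Decidable (Spec_reorder_letter_logs ordered_letter_logs log_words out) := by unfold Spec_reorder_letter_logs; infer_instance

-- ===== CLAIM (what is proved, stated in full; the proofs are below) =====
def Claim_equal_reorder_letter_logs : Prop := ∀ (ordered_letter_logs : List (List String)) (log_words : List String), Dom_reorder_letter_logs ordered_letter_logs log_words → Spec_reorder_letter_logs ordered_letter_logs log_words (reorder_letter_logs ordered_letter_logs log_words)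

-- ===== LEMMAS AND PROOFS =====

-- B's comparator decides exactly "A's comparator returns 1".
theorem strictly_less_eq_minor (a b : List String) :
    strictly_less a b = decide (minor_words_set a b = 1) := by
  induction a generalizing b with
  | nil => cases b <;> simp [strictly_less, sl_go, minor_words_set]
  | cons x xs ih =>
    cases b with
    | nil => simp [strictly_less, sl_go, minor_words_set]
    | cons y ys =>
      simp only [strictly_less, List.zip_cons_cons, sl_go, minor_words_set]
      split_ifs with h1 h2
      · simp
      · simp
      · exact ih ys

-- once inserted = true, the fold just appends the remaining logs
theorem foldl_inserted (l : List (List String)) (lw : List String) (acc : List (List String)) :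
    l.foldl (fun (acc : List (List String) × Bool) log =>
      if !acc.2 && !strictly_less log lw then (acc.1 ++ [lw, log], true)
      else (acc.1 ++ [log], acc.2)) (acc, true) = (acc ++ l, true) := by
  induction l generalizing acc with
  | nil => simp
  | cons h t ih =>
    simp only [List.foldl_cons, Bool.not_true, Bool.false_and]
    rw [if_neg (by simp : ¬ ((false : Bool) = true))]
    rw [ih (acc ++ [h])]
    simp

-- main invariant: with inserted = false and accumulator acc, B computes acc ++ A's result
theorem foldl_not_inserted (l : List (List String)) (lw : List String) (acc : List (List String)) :
    (if !(l.foldl (fun (acc : List (List String) × Bool) log =>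
        if !acc.2 && !strictly_less log lw then (acc.1 ++ [lw, log], true)
        else (acc.1 ++ [log], acc.2)) (acc, false)).2
     then (l.foldl (fun (acc : List (List String) × Bool) log =>
        if !acc.2 && !strictly_less log lw then (acc.1 ++ [lw, log], true)
        else (acc.1 ++ [log], acc.2)) (acc, false)).1 ++ [lw]
     else (l.foldl (fun (acc : List (List String) × Bool) log =>
        if !acc.2 && !strictly_less log lw then (acc.1 ++ [lw, log], true)
        else (acc.1 ++ [log], acc.2)) (acc, false)).1) = acc ++ reorder_letter_logs l lw := by
  induction l generalizing acc with
  | nil => simp [reorder_letter_logs]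
  | cons h t ih =>
    simp only [List.foldl_cons]
    by_cases hm : minor_words_set h lw = 1
    · have hsl : strictly_less h lw = true := by
        rw [strictly_less_eq_minor]; exact decide_eq_true hm
      rw [if_neg (by simp [hsl] : ¬ ((!(false : Bool) && !strictly_less h lw) = true))]
      rw [ih (acc ++ [h])]
      simp [reorder_letter_logs, hm]
    · have hsl : strictly_less h lw = false := by
        rw [strictly_less_eq_minor]; exact decide_eq_false hm
      rw [if_pos (by simp [hsl] : (!(false : Bool) && !strictly_less h lw) = true)]
      rw [foldl_inserted]
      simp [reorder_letter_logs, hm]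

-- ===== VERDICT (by name: the statement is the Claim_ definition above) =====
theorem reorder_letter_logs_spec : Claim_equal_reorder_letter_logs := by
  intro olls lw _
  show reorder_letter_logs olls lw = reorder_letter_logs_alt olls lw
  have := foldl_not_inserted olls lw []
  simpa [reorder_letter_logs_alt] using this.symm
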